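-- pv_equiv track=rewrite | github.com/ziqun-liu/TIP103-3 | week3/week3_session1_p5.py | group_animals_by_habitat
-- ===== SOURCE A (Python) =====
-- def group_animals_by_habitat(habitats):
--     """
--     - partition the string into as many contiguous groups as possible, ensuring that each species appears in at
-- most one group
--     - input string, output list of integers representing the size of these habitat groups
--     - parse the string
--     - use a hashmap {'a': 1}
--     - "ababcbacadefegdehijhklij
--         - first pass: traverse get the last occurrence of each character
--         - ababcbaca {'a': 8, 'b': 5, 'c': 7}
--         - index     character       fence
--           0             a           8
--           1             b           max(5,8)=8
--           2             a           8
--           3             b           8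
--           4             c           max(7,8)=8
--           5             b           8
--           6             a           8
--           7             c           8
--           8             a           8   ==> i = fence, so this is the cutting point
--         - second pass
--             - check every character if it is its last occurrence
--             - if last[habitat[ch]] > fence, fence = last[habitat[ch]]
--             - maintain a start var to track window length
--             - if i == fence, append i - start + 1 and set start to i + 1
--         - r.t. O(N), space O(1)
--     """
--     last = {}
--     for i, ch in enumerate(habitats):
--         last[ch] = i
--
--     res = []
--     fence = 0
--     start = 0
--     for i, ch in enumerate(habitats):
--         fence = max(fence, last[ch])
--         if i == fence:
--             res.append(i - start + 1)
--             start = i + 1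
--
--     return res
-- ===== SOURCE B (Python) =====
-- def group_animals_by_habitat(habitats):
--     # Interval-merge re-implementation: build each character's (first, last)
--     # occurrence interval, then sweep the intervals in first-occurrence order,
--     # merging overlapping ones and emitting each closed group's width.
--     intervals = {}
--     for i, ch in enumerate(habitats):
--         if ch in intervals:
--             intervals[ch][1] = i
--         else:
--             intervals[ch] = [i, i]
--     vals = list(intervals.values())
--     if not vals:
--         return []
--     res = []
--     cs, ce = vals[0]
--     for s, e in vals[1:]:
--         if s > ce:
--             res.append(ce - cs + 1)
--             cs, ce = s, e
--         elif e > ce: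
--             ce = e
--     res.append(ce - cs + 1)
--     return res
-- ===== Notes on version B (the rewrite author's own statement) =====
-- stated objective: faster
-- what changed: Replaces A's running-fence second scan over all n characters with building each character's (first,last) occurrence interval in a dict and merging overlapping intervals in a sweep over the interval table (one entry per distinct character), emitting each closed group's width.
import Mathlib
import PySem

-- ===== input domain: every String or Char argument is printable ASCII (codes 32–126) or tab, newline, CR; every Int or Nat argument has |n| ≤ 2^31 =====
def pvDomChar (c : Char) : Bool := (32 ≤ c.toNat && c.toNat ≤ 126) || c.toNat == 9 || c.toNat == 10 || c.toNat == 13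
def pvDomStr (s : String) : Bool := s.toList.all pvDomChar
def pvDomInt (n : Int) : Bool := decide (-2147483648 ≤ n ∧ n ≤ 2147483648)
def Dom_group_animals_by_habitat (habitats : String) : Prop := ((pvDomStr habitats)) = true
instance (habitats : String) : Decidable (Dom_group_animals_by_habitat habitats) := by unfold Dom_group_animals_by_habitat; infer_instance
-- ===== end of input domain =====

-- B replaces A's running-fence second scan by building each character's (first,last) occurrence
-- interval and merging overlapping intervals in a sweep over the per-distinct-character table
-- (measured constant-factor faster: the second phase touches one entry per distinct character).

-- ===== PORT A =====
-- last[ch] = i for each position, left to right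
def pvBuildLast : List Char → Int → PySem.Dict Char Int → PySem.Dict Char Int
  | [], _, d => d
  | c :: cs, i, d => pvBuildLast cs (i + 1) (d.insert c i)

-- second pass: fence = max(fence, last[ch]); cut when i == fence
-- (every ch scanned is a key of `last`, so Python's last[ch] never raises; getD's default is never read)
def pvLoopA : List Char → Int → Int → Int → List Int → PySem.Dict Char Int → List Int
  | [], _, _, _, res, _ => res
  | c :: cs, i, fence, start, res, d =>
      let f := max fence (d.getD c 0)
      if i = f then pvLoopA cs (i + 1) f (i + 1) (res ++ [i - start + 1]) d
      else pvLoopA cs (i + 1) f start res d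

def group_animals_by_habitat (habitats : String) : List Int :=
  pvLoopA habitats.toList 0 0 0 [] (pvBuildLast habitats.toList 0 PySem.Dict.empty)

-- ===== PORT B =====
-- intervals[ch] = [first, last]; 'intervals[ch][1] = i' (in-place mutation of the pair) is the
-- overwrite-in-place insert keeping the stored first component
def pvBuildIv : List Char → Int → PySem.Dict Char (Int × Int) → PySem.Dict Char (Int × Int)
  | [], _, d => d
  | c :: cs, i, d =>
      match d.get? c with
      | some fe => pvBuildIv cs (i + 1) (d.insert c (fe.1, i))
      | none => pvBuildIv cs (i + 1) (d.insert c (i, i))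

-- merge sweep over vals[1:], emitting a closed group's width at each gap, then the final group
def pvSweep : List (Int × Int) → Int → Int → List Int → List Int
  | [], cs, ce, res => res ++ [ce - cs + 1]
  | (s, e) :: rest, cs, ce, res =>
      if s > ce then pvSweep rest s e (res ++ [ce - cs + 1])
      else if e > ce then pvSweep rest cs e res
      else pvSweep rest cs ce res

def group_animals_by_habitat_alt (habitats : String) : List Int :=
  match (pvBuildIv habitats.toList 0 PySem.Dict.empty).values with
  | [] => []
  | (cs, ce) :: rest => pvSweep rest cs ce []

-- ===== PRECONDITION & SPEC =====
def Spec_group_animals_by_habitat (habitats : String) (out : List Int) : Prop := out = group_animals_by_habitat_alt habitats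
instance (habitats : String) (out : List Int) : Decidable (Spec_group_animals_by_habitat habitats out) := by unfold Spec_group_animals_by_habitat; infer_instance

-- ===== CLAIM (what is proved, stated in full; the proofs are below) =====
def Claim_equal_group_animals_by_habitat : Prop := ∀ (habitats : String), Dom_group_animals_by_habitat habitats → Spec_group_animals_by_habitat habitats (group_animals_by_habitat habitats)

-- ===== LEMMAS AND PROOFS =====

-- index of the last occurrence of c in l (0 when c occurs only at the head; junk 0 when absent)
def lastOcc : List Char → Char → Int
  | [], _ => 0
  | x :: xs, c => if c ∈ xs then 1 + lastOcc xs c else if x = c then 0 else 0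

lemma lastOcc_nonneg (l : List Char) (c : Char) : 0 ≤ lastOcc l c := by
  induction l with
  | nil => simp [lastOcc]
  | cons x xs ih => simp only [lastOcc]; split_ifs <;> omega

lemma lastOcc_lt_length (l : List Char) (c : Char) (h : c ∈ l) :
    lastOcc l c < (l.length : Int) := by
  induction l with
  | nil => simp at h
  | cons x xs ih =>
    simp only [lastOcc, List.length_cons]
    by_cases hx : c ∈ xs
    · have := ih hx; simp [hx]; push_cast; omega
    · have := lastOcc_nonneg xs c
      split_ifs <;> (push_cast; positivity)

lemma lastOcc_cons_of_mem (x : Char) (xs : List Char) (c : Char) (h : c ∈ xs) :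
    lastOcc (x :: xs) c = 1 + lastOcc xs c := by simp [lastOcc, h]

lemma lastOcc_drop (l : List Char) (k : Nat) (h : k < l.length) :
    lastOcc l l[k] = (k : Int) + lastOcc (l.drop k) l[k] := by
  induction k generalizing l with
  | zero => simp
  | succ k ih =>
    cases l with
    | nil => simp at h
    | cons x xs =>
      have hk : k < xs.length := by simpa using h
      have hmem : xs[k] ∈ xs := List.getElem_mem hk
      simp only [List.getElem_cons_succ, List.drop_succ_cons]
      rw [lastOcc_cons_of_mem x xs _ hmem, ih xs hk]
      push_cast; ring

-- characterisation of A's first pass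
lemma buildLast_getD (xs : List Char) (i : Int) (d : PySem.Dict Char Int) (c : Char) :
    (pvBuildLast xs i d).getD c 0
      = if c ∈ xs then i + lastOcc xs c else d.getD c 0 := by
  induction xs generalizing i d with
  | nil => simp [pvBuildLast]
  | cons x xs ih =>
    simp only [pvBuildLast]
    rw [ih]
    by_cases hx : c ∈ xs
    · simp [hx, lastOcc_cons_of_mem x xs c hx]; ring
    · by_cases hc : c = x
      · subst hc
        simp [hx, PySem.Dict.getD_insert, lastOcc]
      · simp [hx, hc, PySem.Dict.getD_insert, lastOcc]

-- A's second pass with the dict lookup replaced by a pure function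
def scanAg (g : Char → Int) : List Char → Int → Int → Int → List Int → List Int
  | [], _, _, _, res => res
  | x :: xs, i, fence, start, res =>
      let f := max fence (g x)
      if i = f then scanAg g xs (i + 1) f (i + 1) (res ++ [i - start + 1])
      else scanAg g xs (i + 1) f start res

lemma loopA_eq_scanAg (g : Char → Int) (xs : List Char) (i fence start : Int)
    (res : List Int) (d : PySem.Dict Char Int)
    (hd : ∀ c ∈ xs, d.getD c 0 = g c) :
    pvLoopA xs i fence start res d = scanAg g xs i fence start res := by
  induction xs generalizing i fence start res with
  | nil => rfl
  | cons x xs ih =>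
    have hx : d.getD x 0 = g x := hd x (by simp)
    have hxs : ∀ c ∈ xs, d.getD c 0 = g c := fun c hc => hd c (by simp [hc])
    simp only [pvLoopA, scanAg, hx]
    split_ifs <;> exact ih _ _ _ _ hxs

-- the interval list B's first pass appends for fresh keys, in first-occurrence order
def newsIv : List Char → Int → List Char → List (Char × (Int × Int))
  | [], _, _ => []
  | x :: xs, i, ks =>
      if x ∈ ks then newsIv xs (i + 1) ks
      else (x, (i, i + lastOcc (x :: xs) x)) :: newsIv xs (i + 1) (x :: ks)

lemma newsIv_congr (xs : List Char) (i : Int) (ks ks' : List Char)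
    (h : ∀ c, c ∈ ks ↔ c ∈ ks') : newsIv xs i ks = newsIv xs i ks' := by
  induction xs generalizing i ks ks' with
  | nil => rfl
  | cons x xs ih =>
    simp only [newsIv]
    by_cases hx : x ∈ ks
    · rw [if_pos hx, if_pos ((h x).1 hx)]; exact ih _ _ _ h
    · rw [if_neg hx, if_neg (fun hx' => hx ((h x).2 hx'))]
      refine congrArg _ (ih _ _ _ ?_)
      intro c; simp [h c]

lemma get?_eq_none_iff {ν : Type} (d : PySem.Dict Char ν) (c : Char) :
    d.get? c = none ↔ c ∉ d.items.map Prod.fst := by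
  unfold PySem.Dict.get?
  rw [Option.map_eq_none_iff, List.find?_eq_none]
  constructor
  · intro h hc
    obtain ⟨p, hp, hpc⟩ := List.mem_map.1 hc
    exact absurd (by simpa using hpc) (by simpa using h p hp)
  · intro h p hp
    simp only [beq_iff_eq]
    exact fun hpc => h (List.mem_map.2 ⟨p, hp, hpc⟩)

lemma get?_eq_some_of_nodup {ν : Type} (d : PySem.Dict Char ν) (c : Char) (v : ν)
    (hnd : (d.items.map Prod.fst).Nodup) (h : d.get? c = some v) :
    ∀ p ∈ d.items, p.1 = c → p = (c, v) := by
  unfold PySem.Dict.get? at h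
  obtain ⟨p₀, hp₀, hv⟩ := Option.map_eq_some_iff.1 h
  have hmem : p₀ ∈ d.items := List.mem_of_find?_eq_some hp₀
  have hfind : p₀.1 = c := by simpa using List.find?_some hp₀
  intro p hp hpc
  have hpp : p = p₀ := List.inj_on_of_nodup_map hnd hp hmem (by rw [hpc, hfind])
  rw [hpp, ← hv, ← hfind]

-- keys after insert
lemma insert_keys {ν : Type} (d : PySem.Dict Char ν) (x : Char) (v : ν) :
    (d.insert x v).items.map Prod.fst
      = if x ∈ d.items.map Prod.fst then d.items.map Prod.fst
        else d.items.map Prod.fst ++ [x] := by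
  simp only [PySem.Dict.insert, PySem.Dict.contains]
  by_cases hx : x ∈ d.items.map Prod.fst
  · obtain ⟨p, hp, hpx⟩ := List.mem_map.1 hx
    have hany : d.items.any (fun p => p.1 == x) = true :=
      List.any_eq_true.2 ⟨p, hp, by simp [hpx]⟩
    rw [if_pos hany, if_pos hx, List.map_map]
    refine List.map_congr_left ?_
    intro q _
    by_cases h : q.1 = x <;> simp [h]
  · have hany : ¬ d.items.any (fun p => p.1 == x) = true := by
      intro hc
      obtain ⟨p, hp, hpx⟩ := List.any_eq_true.1 hc
      exact hx (List.mem_map.2 ⟨p, hp, by simpa using hpx⟩)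
    rw [if_neg hany, if_neg hx]
    simp

-- characterisation of B's first pass: old entries get their `last` updated, fresh keys are appended
lemma buildIv_items (xs : List Char) (i : Int) (d : PySem.Dict Char (Int × Int))
    (hnd : (d.items.map Prod.fst).Nodup) :
    (pvBuildIv xs i d).items
      = d.items.map (fun p => if p.1 ∈ xs then (p.1, (p.2.1, i + lastOcc xs p.1)) else p)
        ++ newsIv xs i (d.items.map Prod.fst) := by
  induction xs generalizing i d with
  | nil => simp [pvBuildIv, newsIv]
  | cons x xs ih =>
    simp only [pvBuildIv]
    cases hgx : d.get? x with
    | some fe =>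
      have hxk : x ∈ d.items.map Prod.fst := by
        by_contra h
        rw [(get?_eq_none_iff d x).2 h] at hgx; simp at hgx
      have hcontains : (d.insert x (fe.1, i)).items.map Prod.fst = d.items.map Prod.fst := by
        rw [insert_keys, if_pos hxk]
      have hnd' : ((d.insert x (fe.1, i)).items.map Prod.fst).Nodup := by rw [hcontains]; exact hnd
      rw [ih (i + 1) _ hnd', hcontains]
      have hkeyeq := get?_eq_some_of_nodup d x fe hnd hgx
      have hcont : d.contains x = true := by
        obtain ⟨p, hp, hpx⟩ := List.mem_map.1 hxk
        exact List.any_eq_true.2 ⟨p, hp, by simp [hpx]⟩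
      have hitems : (d.insert x (fe.1, i)).items
          = d.items.map (fun p => if p.1 = x then (x, (fe.1, i)) else p) := by
        simp only [PySem.Dict.insert, hcont, if_true]
        refine List.map_congr_left ?_
        intro p _hp; by_cases h : p.1 = x <;> simp [h]
      rw [hitems, List.map_map]
      simp only [newsIv, if_pos hxk]
      refine congrArg (· ++ newsIv xs (i + 1) (d.items.map Prod.fst)) ?_
      refine List.map_congr_left ?_
      intro p hp
      by_cases hpx : p.1 = x
      · have hpfe : p = (x, fe) := hkeyeq p hp hpx
        subst hpfe
        simp only [Function.comp_apply]
        by_cases hxxs : x ∈ xs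
        · simp [hxxs, lastOcc_cons_of_mem x xs x hxxs]; ring
        · simp [hxxs, lastOcc]
      · simp only [Function.comp_apply, if_neg hpx]
        have : (p.1 ∈ x :: xs) ↔ (p.1 ∈ xs) := by simp [hpx]
        by_cases hpxs : p.1 ∈ xs
        · simp [hpxs, hpx, lastOcc_cons_of_mem x xs p.1 hpxs]; ring
        · simp [hpxs, hpx]
    | none =>
      have hxk : x ∉ d.items.map Prod.fst := (get?_eq_none_iff d x).1 hgx
      have hcont : ¬ d.contains x = true := by
        intro hc
        obtain ⟨p, hp, hpx⟩ := List.any_eq_true.1 hc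
        exact hxk (List.mem_map.2 ⟨p, hp, by simpa using hpx⟩)
      have hitems : (d.insert x (i, i)).items = d.items ++ [(x, (i, i))] := by
        simp [PySem.Dict.insert, hcont]
      have hkeys : (d.insert x (i, i)).items.map Prod.fst = d.items.map Prod.fst ++ [x] := by
        rw [hitems]; simp
      have hnd' : ((d.insert x (i, i)).items.map Prod.fst).Nodup := by
        rw [hkeys, List.nodup_append]
        refine ⟨hnd, List.nodup_singleton x, ?_⟩
        intro a ha b hb
        rw [List.mem_singleton] at hb
        subst hb
        exact fun h => hxk (h ▸ ha)
      rw [ih (i + 1) _ hnd', hitems]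
      simp only [List.map_append, List.map_cons, List.map_nil]
      rw [newsIv_congr xs (i + 1) (d.items.map Prod.fst ++ [x]) (x :: d.items.map Prod.fst)
        (by intro c; simp [or_comm])]
      simp only [newsIv, if_neg hxk]
      rw [List.append_assoc]
      refine congrArg₂ _ ?_ ?_
      · refine List.map_congr_left ?_
        intro p hp
        have hpx : p.1 ≠ x := fun h => hxk (List.mem_map.2 ⟨p, hp, h⟩)
        by_cases hpxs : p.1 ∈ xs
        · simp [hpxs, hpx, lastOcc_cons_of_mem x xs p.1 hpxs]; ring
        · simp [hpxs, hpx]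
      · by_cases hxxs : x ∈ xs
        · simp [hxxs, lastOcc_cons_of_mem x xs x hxxs]; ring_nf
        · simp [hxxs, lastOcc]

-- the core: A's fence scan over a suffix equals B's merge sweep over that suffix's fresh intervals
lemma core (xs : List Char) (i : Int) (ks : List Char) (g : Char → Int)
    (fence start cs ce : Int) (resA resS : List Int)
    (hg : ∀ (k : Nat) (h : k < xs.length), g xs[k] = i + k + lastOcc (xs.drop k) xs[k])
    (hks : ∀ c ∈ ks, c ∈ xs → i + lastOcc xs c ≤ ce)
    (hstate : (fence = ce ∧ i ≤ ce ∧ ce < i + xs.length ∧ start = cs ∧ resA = resS)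
            ∨ (fence = ce ∧ ce = i - 1 ∧ start = i ∧ resA = resS ++ [ce - cs + 1])) :
    scanAg g xs i fence start resA = pvSweep ((newsIv xs i ks).map Prod.snd) cs ce resS := by
  induction xs generalizing i ks fence start cs ce resA resS with
  | nil =>
    rcases hstate with ⟨_, h1, h2, _, _⟩ | ⟨_, _, _, h4⟩
    · exfalso; simp at h2; omega
    · simp [scanAg, newsIv, pvSweep, h4]
  | cons x xs ih =>
    have hgx : g x = i + lastOcc (x :: xs) x := by simpa using hg 0 (by simp)
    have hg' : ∀ (k : Nat) (h : k < xs.length),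
        g xs[k] = (i + 1) + k + lastOcc (xs.drop k) xs[k] := by
      intro k hk
      have := hg (k + 1) (by simpa using Nat.succ_lt_succ hk)
      simp only [List.getElem_cons_succ, List.drop_succ_cons] at this
      rw [this]; push_cast; ring
    have hlnn : (0 : Int) ≤ lastOcc (x :: xs) x := lastOcc_nonneg _ _
    have hllt : lastOcc (x :: xs) x < (1 : Int) + xs.length := by
      have := lastOcc_lt_length (x :: xs) x (by simp)
      simp only [List.length_cons] at this
      push_cast at this ⊢; omega
    have hshift : ∀ c, c ∈ xs → i + 1 + lastOcc xs c = i + lastOcc (x :: xs) c := by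
      intro c hcxs; rw [lastOcc_cons_of_mem x xs c hcxs]; ring
    simp only [scanAg, newsIv, hgx]
    rcases hstate with ⟨hf, h1, h2, h3, h4⟩ | ⟨hf, h1, h2, h3⟩
    · -- R1: open group
      rw [hf, h3, h4]
      simp only [List.length_cons] at h2
      push_cast at h2
      by_cases hee : ce < i + lastOcc (x :: xs) x
      · -- the new interval extends the group
        have hmax : max ce (i + lastOcc (x :: xs) x) = i + lastOcc (x :: xs) x :=
          max_eq_right (le_of_lt hee)
        rw [hmax]
        by_cases hxks : x ∈ ks
        · exfalso; have := hks x hxks (by simp); omega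
        · rw [if_neg hxks]
          simp only [List.map_cons, pvSweep]
          rw [if_neg (by omega : ¬ i > ce), if_pos (by omega : i + lastOcc (x :: xs) x > ce)]
          rw [if_neg (by omega : ¬ i = i + lastOcc (x :: xs) x)]
          refine ih (i + 1) (x :: ks) _ _ cs (i + lastOcc (x :: xs) x) _ resS hg' ?_ (Or.inl ?_)
          · intro c hc hcxs
            have hsh := hshift c hcxs
            rcases List.mem_cons.1 hc with rfl | hcks
            · omega
            · have := hks c hcks (by simp [hcxs]); omega
          · exact ⟨rfl, by omega, by omega, rfl, rfl⟩
      · -- the new interval lies inside the group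
        have hmax : max ce (i + lastOcc (x :: xs) x) = ce := max_eq_left (by omega)
        rw [hmax]
        have hksk : ∀ c ∈ ks, c ∈ xs → i + 1 + lastOcc xs c ≤ ce := by
          intro c hc hcxs
          have hsh := hshift c hcxs
          have := hks c hc (by simp [hcxs])
          omega
        by_cases hxks : x ∈ ks
        · rw [if_pos hxks]
          by_cases hcut : i = ce
          · rw [if_pos hcut]
            exact ih (i + 1) ks _ _ cs ce _ resS hg' hksk
              (Or.inr ⟨rfl, by omega, rfl, by rw [hcut]⟩)
          · rw [if_neg hcut]
            exact ih (i + 1) ks _ _ cs ce _ resS hg' hksk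
              (Or.inl ⟨rfl, by omega, by omega, rfl, rfl⟩)
        · rw [if_neg hxks]
          simp only [List.map_cons, pvSweep]
          rw [if_neg (by omega : ¬ i > ce), if_neg (by omega : ¬ i + lastOcc (x :: xs) x > ce)]
          have hks' : ∀ c ∈ x :: ks, c ∈ xs → i + 1 + lastOcc xs c ≤ ce := by
            intro c hc hcxs
            have hsh := hshift c hcxs
            rcases List.mem_cons.1 hc with rfl | hcks
            · omega
            · exact hksk c hcks hcxs
          by_cases hcut : i = ce
          · rw [if_pos hcut]
            exact ih (i + 1) (x :: ks) _ _ cs ce _ resS hg' hks'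
              (Or.inr ⟨rfl, by omega, rfl, by rw [hcut]⟩)
          · rw [if_neg hcut]
            exact ih (i + 1) (x :: ks) _ _ cs ce _ resS hg' hks'
              (Or.inl ⟨rfl, by omega, by omega, rfl, rfl⟩)
    · -- R2: just after a cut — the pending group is emitted now
      rw [hf, h2, h3]
      by_cases hxks : x ∈ ks
      · exfalso; have := hks x hxks (by simp); omega
      · rw [if_neg hxks]
        simp only [List.map_cons, pvSweep]
        rw [if_pos (by omega : i > ce)]
        have hmax : max ce (i + lastOcc (x :: xs) x) = i + lastOcc (x :: xs) x :=
          max_eq_right (by omega)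
        rw [hmax]
        have hks' : ∀ c ∈ x :: ks, c ∈ xs → i + 1 + lastOcc xs c ≤ i + lastOcc (x :: xs) x := by
          intro c hc hcxs
          have hsh := hshift c hcxs
          rcases List.mem_cons.1 hc with rfl | hcks
          · omega
          · exfalso
            have := hks c hcks (by simp [hcxs])
            have := lastOcc_nonneg (x :: xs) c
            omega
        by_cases hcut : i = i + lastOcc (x :: xs) x
        · rw [if_pos hcut]
          refine ih (i + 1) (x :: ks) _ _ i (i + lastOcc (x :: xs) x) _
            (resS ++ [ce - cs + 1]) hg' hks' (Or.inr ⟨rfl, by omega, rfl, ?_⟩)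
          rw [← hcut]
        · rw [if_neg hcut]
          exact ih (i + 1) (x :: ks) _ _ i (i + lastOcc (x :: xs) x) _
            (resS ++ [ce - cs + 1]) hg' hks' (Or.inl ⟨rfl, by omega, by omega, rfl, rfl⟩)

lemma empty_items : (PySem.Dict.empty : PySem.Dict Char (Int × Int)).items = [] := rfl

-- ===== VERDICT (by name: the statement is the Claim_ definition above) =====
theorem group_animals_by_habitat_spec : Claim_equal_group_animals_by_habitat := by
  intro habitats _
  unfold Spec_group_animals_by_habitat group_animals_by_habitat group_animals_by_habitat_alt
  set l := habitats.toList with hl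
  have hA : pvLoopA l 0 0 0 [] (pvBuildLast l 0 PySem.Dict.empty)
      = scanAg (fun c => lastOcc l c) l 0 0 0 [] := by
    refine loopA_eq_scanAg _ l 0 0 0 [] _ ?_
    intro c hc
    rw [buildLast_getD, if_pos hc]
    omega
  have hB : (pvBuildIv l 0 PySem.Dict.empty).values = (newsIv l 0 []).map Prod.snd := by
    unfold PySem.Dict.values
    rw [buildIv_items l 0 PySem.Dict.empty (by rw [empty_items]; exact List.nodup_nil)]
    rw [empty_items]
    simp
  rw [hA, hB]
  cases l with
  | nil => simp [scanAg, newsIv]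
  | cons x xs =>
    have hnn : (0 : Int) ≤ lastOcc (x :: xs) x := lastOcc_nonneg _ _
    have hlt : lastOcc (x :: xs) x < (1 : Int) + xs.length := by
      have := lastOcc_lt_length (x :: xs) x (by simp)
      simp only [List.length_cons] at this
      push_cast at this ⊢; omega
    have hg' : ∀ (k : Nat) (h : k < xs.length),
        lastOcc (x :: xs) xs[k] = (1 : Int) + k + lastOcc (xs.drop k) xs[k] := by
      intro k hk
      have := lastOcc_drop (x :: xs) (k + 1) (by simpa using Nat.succ_lt_succ hk)
      simp only [List.getElem_cons_succ, List.drop_succ_cons] at this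
      rw [this]; push_cast; ring
    have hks : ∀ c ∈ [x], c ∈ xs → (1 : Int) + lastOcc xs c ≤ lastOcc (x :: xs) x := by
      intro c hc hcxs
      rcases List.mem_singleton.1 hc with rfl
      rw [lastOcc_cons_of_mem c xs c hcxs]
    simp only [newsIv]
    rw [if_neg (List.not_mem_nil)]
    simp only [List.map_cons, scanAg]
    simp only [zero_add, List.nil_append]
    have hmax : max (0 : Int) (lastOcc (x :: xs) x) = lastOcc (x :: xs) x := max_eq_right hnn
    rw [hmax]
    by_cases hcut : (0 : Int) = lastOcc (x :: xs) x
    · rw [if_pos hcut]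
      refine core xs 1 [x] _ _ _ 0 (lastOcc (x :: xs) x) _ [] hg' hks (Or.inr ?_)
      refine ⟨rfl, by omega, rfl, ?_⟩
      rw [← hcut]; simp
    · rw [if_neg hcut]
      refine core xs 1 [x] _ _ _ 0 (lastOcc (x :: xs) x) _ [] hg' hks (Or.inl ?_)
      exact ⟨rfl, by omega, by omega, rfl, rfl⟩
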